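-- pv_equiv track=rewrite | github.com/Ellie816/InfoSec-Projects | Login_lab/deliverables/ch6.py | find_vigenere_key
-- ===== SOURCE A (Python) =====
-- def find_vigenere_key(plaintext, ciphertext):
--     def letter_to_num(letter):
--         return ord(letter.upper()) - ord('A')
--
--     def num_to_letter(num):
--         return chr(num + ord('A'))
--
--     key = []
--     for p, c in zip(plaintext, ciphertext):
--         shift = (letter_to_num(c) - letter_to_num(p)) % 26
--         key.append(num_to_letter(shift))
--     key = ''.join(key)
--
--     # detect pattern in the key
--     for i in range(1, len(key)):
--         if key[:i] == key[i:2*i]: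
--             return key[:i]
--     return key
-- ===== SOURCE B (Python) =====
-- def find_vigenere_key(plaintext, ciphertext):
--     # derive the shift key, then find the shortest square prefix with the
--     # Z-algorithm (z[i] >= i  <=>  key[:i] == key[i:2*i]) in linear time
--     key = ''.join(chr((ord(c.upper()) - ord(p.upper())) % 26 + ord('A'))
--                   for p, c in zip(plaintext, ciphertext))
--     n = len(key)
--     z = [0] * n
--     l = r = 0
--     for i in range(1, n):
--         zi = min(z[i - l], r - i) if i < r else 0
--         while i + zi < n and key[zi] == key[i + zi]:
--             zi += 1
--         z[i] = zi
--         if i + zi > r: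
--             l, r = i, i + zi
--     for i in range(1, n):
--         if z[i] >= i:
--             return key[:i]
--     return key
-- ===== Notes on version B (the rewrite author's own statement) =====
-- stated objective: faster
-- what changed: Replaced A's quadratic scan that re-compares the slices key[:i] and key[i:2*i] for every i by a single linear-time Z-algorithm pass (z[i] >= i iff key[:i] == key[i:2*i]), so the shortest square prefix of the derived shift key is found in O(n).
import Mathlib
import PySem

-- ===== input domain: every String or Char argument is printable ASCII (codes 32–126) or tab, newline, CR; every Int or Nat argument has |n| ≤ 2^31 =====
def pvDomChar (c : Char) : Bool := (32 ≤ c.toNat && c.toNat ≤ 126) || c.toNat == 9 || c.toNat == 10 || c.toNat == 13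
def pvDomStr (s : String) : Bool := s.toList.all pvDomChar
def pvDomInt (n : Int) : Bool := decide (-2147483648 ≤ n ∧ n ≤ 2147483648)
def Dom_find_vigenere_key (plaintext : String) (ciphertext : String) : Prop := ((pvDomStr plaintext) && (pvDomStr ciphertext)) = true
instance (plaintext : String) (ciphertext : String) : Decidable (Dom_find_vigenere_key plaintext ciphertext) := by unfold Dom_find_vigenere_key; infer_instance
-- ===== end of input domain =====

-- B replaces A's quadratic slice-comparison scan for the shortest repeating
-- prefix of the shift key by a linear-time Z-algorithm (z[i] >= i  <=>
-- key[:i] == key[i:2*i]); objective: faster (asymptotic, O(n^2) -> O(n)).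


-- ===== PORT A =====
-- letter_to_num(letter) = ord(letter.upper()) - ord('A')  (PySem.Chars.upperChar is Python's 1-char str.upper)
def pvLetterToNum (letter : Char) : Int := ((PySem.Chars.upperChar letter).toNat : Int) - 65
-- num_to_letter(num) = chr(num + ord('A'))  (num is always in 0..25 here, so Char.ofNat is exact)
def pvNumToLetter (num : Int) : Char := Char.ofNat (num + 65).toNat
-- the key-building for-loop: append num_to_letter((letter_to_num(c) - letter_to_num(p)) % 26) per zipped pair
def pvKeyA (plaintext : String) (ciphertext : String) : List Char :=
  (plaintext.toList.zip ciphertext.toList).foldl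
    (fun acc pc => acc ++ [pvNumToLetter (PySem.Int.mod (pvLetterToNum pc.2 - pvLetterToNum pc.1) 26)]) []

-- 'for i in range(1, len(key)): if key[:i] == key[i:2*i]: return key[:i]'; early return = first match.
-- Slices with the nonnegative bounds i and 2*i are exactly 'take i' and '(drop i).take i' (PySem.List.slice_toNat).
def find_vigenere_key (plaintext : String) (ciphertext : String) : String :=
  let key := pvKeyA plaintext ciphertext
  match (List.range' 1 (key.length - 1)).find? (fun i => key.take i == (key.drop i).take i) with
  | some i => String.ofList (key.take i)
  | none => String.ofList key

-- ===== PORT B =====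
-- the key comprehension: chr((ord(c.upper()) - ord(p.upper())) % 26 + ord('A'))
def pvKeyB (plaintext : String) (ciphertext : String) : List Char :=
  (plaintext.toList.zip ciphertext.toList).map
    (fun pc => Char.ofNat (PySem.Int.mod (((PySem.Chars.upperChar pc.2).toNat : Int)
        - ((PySem.Chars.upperChar pc.1).toNat : Int)) 26 + 65).toNat)

-- 'while i + zi < n and key[zi] == key[i + zi]: zi += 1'
def pvZExtend (key : List Char) (i : Nat) (zi : Nat) : Nat :=
  if h : i + zi < key.length ∧ key[zi]? = key[i + zi]? then pvZExtend key i (zi + 1) else zi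
  termination_by key.length - (i + zi)
  decreasing_by omega

-- 'for i in range(1, n): zi = min(z[i-l], r-i) if i < r else 0; <while>; z[i] = zi; if i+zi > r: l,r = i,i+zi'
def pvZMain (key : List Char) (i : Nat) (z : List Nat) (l : Nat) (r : Nat) : List Nat :=
  if i < key.length then
    let zi0 := if i < r then min (z.getD (i - l) 0) (r - i) else 0
    let zi := pvZExtend key i zi0
    let z' := z.set i zi
    if r < i + zi then pvZMain key (i + 1) z' i (i + zi) else pvZMain key (i + 1) z' l r
  else z
  termination_by key.length - i
  decreasing_by all_goals omega

-- 'for i in range(1, n): if z[i] >= i: return key[:i]' then 'return key'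
def find_vigenere_key_alt (plaintext : String) (ciphertext : String) : String :=
  let key := pvKeyB plaintext ciphertext
  let z := pvZMain key 1 (List.replicate key.length 0) 0 0
  match (List.range' 1 (key.length - 1)).find? (fun i => i ≤ z.getD i 0) with
  | some i => String.ofList (key.take i)
  | none => String.ofList key

-- ===== PRECONDITION & SPEC =====
def Spec_find_vigenere_key (plaintext : String) (ciphertext : String) (out : String) : Prop := out = find_vigenere_key_alt plaintext ciphertext
instance (plaintext : String) (ciphertext : String) (out : String) : Decidable (Spec_find_vigenere_key plaintext ciphertext out) := by unfold Spec_find_vigenere_key; infer_instance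

-- ===== CLAIM (what is proved, stated in full; the proofs are below) =====
def Claim_equal_find_vigenere_key : Prop := ∀ (plaintext : String) (ciphertext : String), Dom_find_vigenere_key plaintext ciphertext → Spec_find_vigenere_key plaintext ciphertext (find_vigenere_key plaintext ciphertext)

-- ===== LEMMAS AND PROOFS =====

-- length of the longest common prefix of two lists (the value z[i] computes for key and key.drop i)
def pvLcp : List Char → List Char → Nat
  | a :: s, b :: t => if a = b then pvLcp s t + 1 else 0
  | _, _ => 0

theorem pvLcp_nil_left (t : List Char) : pvLcp [] t = 0 := by cases t <;> rfl

theorem pvLcp_nil_right (s : List Char) : pvLcp s [] = 0 := by cases s <;> rfl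

theorem pvLcp_le_left : ∀ (s t : List Char), pvLcp s t ≤ s.length := by
  intro s; induction s with
  | nil => intro t; rw [pvLcp_nil_left]; simp
  | cons a s ih =>
    intro t; cases t with
    | nil => rw [pvLcp_nil_right]; simp
    | cons b t =>
      simp only [pvLcp]; split
      · have := ih t; simp only [List.length_cons]; omega
      · simp

theorem pvLcp_le_right : ∀ (s t : List Char), pvLcp s t ≤ t.length := by
  intro s; induction s with
  | nil => intro t; rw [pvLcp_nil_left]; simp
  | cons a s ih =>
    intro t; cases t with
    | nil => rw [pvLcp_nil_right]; simp
    | cons b t =>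
      simp only [pvLcp]; split
      · have := ih t; simp only [List.length_cons]; omega
      · simp

theorem pvLcp_getElem? : ∀ (s t : List Char) (m : Nat), m < pvLcp s t → s[m]? = t[m]? := by
  intro s; induction s with
  | nil => intro t m h; rw [pvLcp_nil_left] at h; omega
  | cons a s ih =>
    intro t m h; cases t with
    | nil => rw [pvLcp_nil_right] at h; omega
    | cons b t =>
      simp only [pvLcp] at h
      by_cases hab : a = b
      · rw [if_pos hab] at h
        cases m with
        | zero => simp [hab]
        | succ m => simp only [List.getElem?_cons_succ]; exact ih t m (by omega)
      · rw [if_neg hab] at h; omega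

theorem pvLcp_max : ∀ (s t : List Char), pvLcp s t < s.length → pvLcp s t < t.length →
    s[pvLcp s t]? ≠ t[pvLcp s t]? := by
  intro s; induction s with
  | nil => intro t h1 _; rw [pvLcp_nil_left] at *; simp at h1
  | cons a s ih =>
    intro t; cases t with
    | nil => intro _ h2; rw [pvLcp_nil_right] at h2; simp at h2
    | cons b t =>
      by_cases hab : a = b
      · have hl : pvLcp (a :: s) (b :: t) = pvLcp s t + 1 := by simp [pvLcp, hab]
        rw [hl]
        simp only [List.getElem?_cons_succ, List.length_cons]
        intro _ h2
        exact ih t (by omega) (by omega)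
      · have hl : pvLcp (a :: s) (b :: t) = 0 := by simp [pvLcp, hab]
        rw [hl]
        intro _ _
        simpa using hab

theorem pvLcp_ge : ∀ (s t : List Char) (k : Nat), k ≤ s.length → k ≤ t.length →
    (∀ m, m < k → s[m]? = t[m]?) → k ≤ pvLcp s t := by
  intro s; induction s with
  | nil => intro t k h1 _ _; rw [pvLcp_nil_left]; simpa using h1
  | cons a s ih =>
    intro t k h1 h2 h3; cases t with
    | nil => rw [pvLcp_nil_right]; simpa using h2
    | cons b t =>
      cases k with
      | zero => omega
      | succ k =>
        have hab : a = b := by have := h3 0 (by omega); simpa using this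
        have hl : pvLcp (a :: s) (b :: t) = pvLcp s t + 1 := by simp [pvLcp, hab]
        rw [hl]
        have hk : k ≤ pvLcp s t := by
          refine ih t k (by simpa using h1) (by simpa using h2) ?_
          intro m hm; have := h3 (m + 1) (by omega); simpa using this
        omega

-- the while loop computes the exact lcp when started from a sound lower bound
theorem pvZExtend_eq (key : List Char) (i zi : Nat)
    (h : zi ≤ pvLcp key (key.drop i)) : pvZExtend key i zi = pvLcp key (key.drop i) := by
  rw [pvZExtend]
  split <;> rename_i hc
  · -- the guard holds: zi is strictly below the lcp, step
    have hlt : zi < pvLcp key (key.drop i) := by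
      rcases Nat.lt_or_ge zi (pvLcp key (key.drop i)) with h' | h'
      · exact h'
      · exfalso
        have hzi : zi = pvLcp key (key.drop i) := by omega
        have h1 : pvLcp key (key.drop i) < key.length := by omega
        have h2 : pvLcp key (key.drop i) < (key.drop i).length := by
          simp only [List.length_drop]; omega
        have := pvLcp_max key (key.drop i) h1 h2
        rw [List.getElem?_drop] at this
        exact this (by rw [← hzi]; exact hc.2)
    exact pvZExtend_eq key i (zi + 1) (by omega)
  · -- the guard fails: zi is already the lcp
    rcases Nat.lt_or_ge zi (pvLcp key (key.drop i)) with h' | h'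
    · exfalso
      have hz2 : zi < (key.drop i).length := by
        have := pvLcp_le_right key (key.drop i); omega
      simp only [List.length_drop] at hz2
      have heq := pvLcp_getElem? key (key.drop i) zi h'
      rw [List.getElem?_drop] at heq
      exact hc ⟨by omega, heq⟩
    · omega
  termination_by key.length - (i + zi)
  decreasing_by omega

-- main-loop invariant: all finished entries hold the lcp, and (l, r) is a true z-box
theorem pvZMain_spec (key : List Char) : ∀ (n i : Nat) (z : List Nat) (l r : Nat),
    key.length ≤ i + n → 1 ≤ i → z.length = key.length →
    (∀ j, 1 ≤ j → j < i → z.getD j 0 = pvLcp key (key.drop j)) →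
    ((l = 0 ∧ r = 0) ∨ (1 ≤ l ∧ l < i ∧ r = l + pvLcp key (key.drop l))) →
    ∀ j, 1 ≤ j → j < key.length → (pvZMain key i z l r).getD j 0 = pvLcp key (key.drop j) := by
  intro n
  induction n with
  | zero =>
    intro i z l r hn hi hlen hz hbox j hj1 hj2
    rw [pvZMain, if_neg (by omega)]
    exact hz j hj1 (by omega)
  | succ n ih =>
    intro i z l r hn hi hlen hz hbox j hj1 hj2
    rw [pvZMain]
    split <;> rename_i hin
    · -- loop body
      dsimp only
      have hsound : (if i < r then min (z.getD (i - l) 0) (r - i) else 0) ≤ pvLcp key (key.drop i) := by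
        split <;> rename_i hir
        · rcases hbox with ⟨hl0, hr0⟩ | ⟨hl1, hli, hr⟩
          · omega
          · have hLl_le : pvLcp key (key.drop l) ≤ key.length - l := by
              have := pvLcp_le_right key (key.drop l); simpa using this
            have hzv : z.getD (i - l) 0 = pvLcp key (key.drop (i - l)) :=
              hz (i - l) (by omega) (by omega)
            rw [hzv]
            apply pvLcp_ge
            · have := pvLcp_le_left key (key.drop (i - l)); omega
            · simp only [List.length_drop]; omega
            · intro m hm
              have hm1 : m < pvLcp key (key.drop (i - l)) := by omega
              have hm2 : (i - l) + m < pvLcp key (key.drop l) := by omega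
              have e1 := pvLcp_getElem? key (key.drop (i - l)) m hm1
              rw [List.getElem?_drop] at e1
              have e2 := pvLcp_getElem? key (key.drop l) ((i - l) + m) hm2
              rw [List.getElem?_drop] at e2
              rw [List.getElem?_drop]
              rw [e1, e2]
              congr 1
              omega
        · omega
      rw [pvZExtend_eq key i _ hsound]
      have hlen' : (z.set i (pvLcp key (key.drop i))).length = key.length := by
        simpa using hlen
      have hz' : ∀ j', 1 ≤ j' → j' < i + 1 →
          (z.set i (pvLcp key (key.drop i))).getD j' 0 = pvLcp key (key.drop j') := by
        intro j' hj'1 hj'2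
        rcases Nat.eq_or_lt_of_le (Nat.lt_succ_iff.mp hj'2) with he | hlt
        · subst he
          simp only [List.getD]
          rw [List.getElem?_set_self (by omega)]
          rfl
        · simp only [List.getD]
          rw [List.getElem?_set_ne (by omega)]
          exact hz j' hj'1 hlt
      split <;> rename_i hr'
      · exact ih (i + 1) _ i (i + pvLcp key (key.drop i)) (by omega) (by omega) hlen' hz'
          (Or.inr ⟨by omega, by omega, rfl⟩) j hj1 hj2
      · refine ih (i + 1) _ l r (by omega) (by omega) hlen' hz' ?_ j hj1 hj2
        rcases hbox with h | ⟨h1, h2, h3⟩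
        · exact Or.inl h
        · exact Or.inr ⟨h1, by omega, h3⟩
    · exact hz j hj1 (by omega)

-- the two keys are the same list of characters
theorem pvKey_eq (plaintext ciphertext : String) : pvKeyA plaintext ciphertext = pvKeyB plaintext ciphertext := by
  unfold pvKeyA pvKeyB
  rw [PySem.List.foldl_append_singleton_eq_map]
  simp only [List.nil_append]
  apply List.map_congr_left
  intro pc _
  simp only [pvNumToLetter, pvLetterToNum]
  rw [show (((PySem.Chars.upperChar pc.2).toNat : Int) - 65) - (((PySem.Chars.upperChar pc.1).toNat : Int) - 65)
      = ((PySem.Chars.upperChar pc.2).toNat : Int) - ((PySem.Chars.upperChar pc.1).toNat : Int) from by ring]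

-- A's slice test equals B's z-value test
theorem pvCond_iff (key : List Char) (i : Nat) (h1 : 1 ≤ i) (h2 : i < key.length) :
    (key.take i = (key.drop i).take i) ↔ i ≤ pvLcp key (key.drop i) := by
  constructor
  · intro he
    have hlen : ((key.drop i).take i).length = i := by
      rw [← he]; simp; omega
    simp only [List.length_take, List.length_drop] at hlen
    apply pvLcp_ge
    · omega
    · simp only [List.length_drop]; omega
    · intro m hm
      have := congrArg (fun l => l[m]?) he
      simp only at this
      rw [List.getElem?_take_of_lt hm, List.getElem?_take_of_lt hm] at this
      exact this
  · intro hle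
    have hL2 : pvLcp key (key.drop i) ≤ key.length - i := by
      have := pvLcp_le_right key (key.drop i); simpa using this
    apply List.ext_getElem?
    intro m
    rcases Nat.lt_or_ge m i with hm | hm
    · rw [List.getElem?_take_of_lt hm, List.getElem?_take_of_lt hm]
      exact pvLcp_getElem? key (key.drop i) m (by omega)
    · rw [List.getElem?_eq_none_iff.mpr (by simp; omega), List.getElem?_eq_none_iff.mpr (by simp; omega)]

-- find? with pointwise-equal predicates on the members
theorem pvFind?_congr {α : Type} (l : List α) (p q : α → Bool) (h : ∀ x ∈ l, p x = q x) :
    l.find? p = l.find? q := by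
  induction l with
  | nil => rfl
  | cons a l ih =>
    simp only [List.find?]
    rw [h a (by simp)]
    split
    · rfl
    · exact ih (fun x hx => h x (by simp [hx]))

-- ===== VERDICT (by name: the statement is the Claim_ definition above) =====
theorem find_vigenere_key_spec : Claim_equal_find_vigenere_key := by
  unfold Claim_equal_find_vigenere_key Spec_find_vigenere_key
  intro plaintext ciphertext _
  unfold find_vigenere_key find_vigenere_key_alt
  dsimp only
  rw [pvKey_eq]
  set key := pvKeyB plaintext ciphertext with hkey
  have hzspec := pvZMain_spec key key.length 1 (List.replicate key.length 0) 0 0 (by omega)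
    (by omega) (by simp) (by intro j h1 h2; omega) (Or.inl ⟨rfl, rfl⟩)
  have hfind : (List.range' 1 (key.length - 1)).find? (fun i => key.take i == (key.drop i).take i)
      = (List.range' 1 (key.length - 1)).find?
        (fun i => i ≤ (pvZMain key 1 (List.replicate key.length 0) 0 0).getD i 0) := by
    apply pvFind?_congr
    intro x hx
    rw [List.mem_range'_1] at hx
    have hx2 : x < key.length := by omega
    rw [hzspec x hx.1 hx2]
    by_cases hc : key.take x = (key.drop x).take x
    · have hd := (pvCond_iff key x hx.1 hx2).mp hc
      simp [hc, hd]
    · have hd : ¬ x ≤ pvLcp key (key.drop x) := fun h => hc ((pvCond_iff key x hx.1 hx2).mpr h)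
      simp [hc, hd]
  rw [hfind]
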